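-- pv_equiv track=rewrite | github.com/GundalaNikhil/DSA | generate_bitwise_all_correct.py | bit012_solution
-- ===== SOURCE A (Python) =====
-- def bit012_solution(a: list) -> int:
--     """BIT-012: Distinct Subarray XORs"""
--     xor_values = set()
--     for i in range(len(a)):
--         xor_val = 0
--         for j in range(i, len(a)):
--             xor_val ^= a[j]
--             xor_values.add(xor_val)
--     return len(xor_values)
-- ===== SOURCE B (Python) =====
-- def bit012_solution(a: list) -> int:
--     """BIT-012: Distinct Subarray XORs — prefix-XOR table, then a pairwise pass."""
--     p = [0]
--     for x in a:
--         p.append(p[-1] ^ x)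
--     n = len(a)
--     xors = set()
--     for i in range(n):
--         for j in range(i + 1, n + 1):
--             xors.add(p[i] ^ p[j])
--     return len(xors)
-- ===== Notes on version B (the rewrite author's own statement) =====
-- stated objective: alternative
-- what changed: B precomputes a prefix-XOR table once and then does a pairwise pass inserting p[i]^p[j] for i<j, instead of A's running XOR accumulator restarted for every start index.
import Mathlib
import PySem

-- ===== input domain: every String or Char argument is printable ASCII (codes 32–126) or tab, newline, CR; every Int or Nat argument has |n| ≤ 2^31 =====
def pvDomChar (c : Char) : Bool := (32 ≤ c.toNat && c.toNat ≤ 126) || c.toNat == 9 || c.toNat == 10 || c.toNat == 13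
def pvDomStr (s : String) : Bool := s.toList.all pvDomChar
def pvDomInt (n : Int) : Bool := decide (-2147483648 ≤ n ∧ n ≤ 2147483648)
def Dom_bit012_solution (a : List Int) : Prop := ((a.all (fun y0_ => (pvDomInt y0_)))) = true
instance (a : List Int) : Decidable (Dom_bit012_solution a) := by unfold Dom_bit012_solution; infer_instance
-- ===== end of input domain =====

-- B replaces A's per-start running XOR accumulator by a prefix-XOR table and a pairwise pass (alternative decomposition, same cost).

-- ===== PORT A =====
-- A: for i in range(len(a)): xor_val = 0; for j in range(i, len(a)): xor_val ^= a[j]; xor_values.add(xor_val); return len(xor_values)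
def bit012_solution (a : List Int) : Int :=
  let xorValues : PySem.Set Int :=
    (PySem.List.pyRange 0 (PySem.List.len a) 1).foldl (fun xorValues i =>
      ((PySem.List.pyRange i (PySem.List.len a) 1).foldl
        (fun (st : Int × PySem.Set Int) j =>
          (PySem.Int.bxor st.1 (PySem.List.pyGetD a j 0),
           PySem.Set.add st.2 (PySem.Int.bxor st.1 (PySem.List.pyGetD a j 0))))
        ((0 : Int), xorValues)).2)
      PySem.Set.empty
  PySem.Set.len xorValues

-- ===== PORT B =====
-- B: p = [0]; for x in a: p.append(p[-1]^x); then for i in range(n): for j in range(i+1, n+1): xors.add(p[i]^p[j])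
def bit012_solution_alt (a : List Int) : Int :=
  let p : List Int := a.foldl (fun p x => p ++ [PySem.Int.bxor (PySem.List.pyGetD p (-1) 0) x]) [(0 : Int)]
  let n : Int := PySem.List.len a
  let xors : PySem.Set Int :=
    (PySem.List.pyRange 0 n 1).foldl (fun xors i =>
      (PySem.List.pyRange (i + 1) (n + 1) 1).foldl
        (fun xors j => PySem.Set.add xors (PySem.Int.bxor (PySem.List.pyGetD p i 0) (PySem.List.pyGetD p j 0)))
        xors)
      PySem.Set.empty
  PySem.Set.len xors

-- ===== PRECONDITION & SPEC =====
def Spec_bit012_solution (a : List Int) (out : Int) : Prop := out = bit012_solution_alt a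
instance (a : List Int) (out : Int) : Decidable (Spec_bit012_solution a out) := by unfold Spec_bit012_solution; infer_instance

-- ===== CLAIM (what is proved, stated in full; the proofs are below) =====
def Claim_equal_bit012_solution : Prop := ∀ (a : List Int), Dom_bit012_solution a → Spec_bit012_solution a (bit012_solution a)

-- ===== LEMMAS AND PROOFS =====

-- sign/magnitude encoding of Int, used to derive associativity of bxor from Nat.xor_assoc
def pvEnc (s : Bool) (n : Nat) : Int := if s then -(n : Int) - 1 else (n : Int)

theorem pvEnc_surj (a : Int) : ∃ s n, a = pvEnc s n := by
  by_cases h : 0 ≤ a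
  · exact ⟨false, a.toNat, by simp [pvEnc, h]⟩
  · exact ⟨true, (-a - 1).toNat, by simp [pvEnc]; omega⟩

theorem bxor_enc (s t : Bool) (m n : Nat) :
    PySem.Int.bxor (pvEnc s m) (pvEnc t n) = pvEnc (s != t) (m ^^^ n) := by
  cases s <;> cases t <;>
    simp [pvEnc, PySem.Int.bxor] <;> omega

theorem bxor_assoc (a b c : Int) :
    PySem.Int.bxor (PySem.Int.bxor a b) c = PySem.Int.bxor a (PySem.Int.bxor b c) := by
  obtain ⟨s, m, rfl⟩ := pvEnc_surj a
  obtain ⟨t, n, rfl⟩ := pvEnc_surj b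
  obtain ⟨u, k, rfl⟩ := pvEnc_surj c
  rw [bxor_enc, bxor_enc, bxor_enc, bxor_enc]
  congr 1
  · cases s <;> cases t <;> cases u <;> rfl
  · exact Nat.xor_assoc m n k

-- prefix XOR of the first k elements
def pfx (a : List Int) (k : Nat) : Int := (a.take k).foldl PySem.Int.bxor 0

theorem pfx_succ (a : List Int) (k : Nat) (h : k < a.length) :
    pfx a (k + 1) = PySem.Int.bxor (pfx a k) a[k] := by
  unfold pfx
  rw [List.take_add_one, List.getElem?_eq_getElem h]
  rw [List.foldl_append]
  rfl

-- membership of the generic set-building outer fold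
theorem mem_foldl_of_mem {α : Type} {f : PySem.Set Int → α → PySem.Set Int} {Q : α → Int → Prop}
    (l : List α) (hf : ∀ s i y, i ∈ l → (y ∈ f s i ↔ y ∈ s ∨ Q i y)) (s : PySem.Set Int) (y : Int) :
    y ∈ l.foldl f s ↔ y ∈ s ∨ ∃ i ∈ l, Q i y := by
  induction l generalizing s with
  | nil => simp
  | cons i l ih =>
    simp only [List.foldl_cons]
    rw [ih (fun s j y hj => hf s j y (List.mem_cons_of_mem _ hj)),
        hf s i y (List.mem_cons_self ..)]
    simp only [List.mem_cons]
    constructor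
    · rintro ((h | h) | ⟨j, hj, h⟩)
      · exact Or.inl h
      · exact Or.inr ⟨i, Or.inl rfl, h⟩
      · exact Or.inr ⟨j, Or.inr hj, h⟩
    · rintro (h | ⟨j, (rfl | hj), h⟩)
      · exact Or.inl (Or.inl h)
      · exact Or.inl (Or.inr h)
      · exact Or.inr ⟨j, hj, h⟩

theorem nodup_foldl {α : Type} {f : PySem.Set Int → α → PySem.Set Int}
    (hf : ∀ s i, s.Nodup → (f s i).Nodup) (l : List α) (s : PySem.Set Int) (hs : s.Nodup) :
    (l.foldl f s).Nodup := by
  induction l generalizing s with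
  | nil => exact hs
  | cons i l ih => exact ih _ (hf s i hs)

-- the inner-loop step of port A
def pvStepA (st : Int × PySem.Set Int) (v : Int) : Int × PySem.Set Int :=
  (PySem.Int.bxor st.1 v, PySem.Set.add st.2 (PySem.Int.bxor st.1 v))

theorem innerA_nodup (l : List Int) (x0 : Int) (s : PySem.Set Int) (hs : s.Nodup) :
    ((l.foldl pvStepA (x0, s)).2).Nodup := by
  induction l generalizing x0 s with
  | nil => exact hs
  | cons v l ih =>
    simp only [List.foldl_cons, pvStepA]
    exact ih _ _ (PySem.Set.nodup_add s _ hs)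

theorem innerA_mem (a : List Int) (i : Nat) (m : Nat) (him : i ≤ m) (hm : m ≤ a.length)
    (s : PySem.Set Int) (y : Int) :
    (y ∈ ((a.drop m).foldl pvStepA (PySem.Int.bxor (pfx a i) (pfx a m), s)).2) ↔
      y ∈ s ∨ ∃ j, m ≤ j ∧ j < a.length ∧ y = PySem.Int.bxor (pfx a i) (pfx a (j + 1)) := by
  by_cases h : m = a.length
  · subst h
    simp only [List.drop_length, List.foldl_nil]
    constructor
    · exact Or.inl
    · rintro (h | ⟨j, h1, h2, _⟩)
      · exact h
      · omega
  · have hlt : m < a.length := by omega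
    rw [List.drop_eq_getElem_cons hlt]
    simp only [List.foldl_cons, pvStepA]
    have hstep : PySem.Int.bxor (PySem.Int.bxor (pfx a i) (pfx a m)) a[m]
        = PySem.Int.bxor (pfx a i) (pfx a (m + 1)) := by
      rw [bxor_assoc, ← pfx_succ a m hlt]
    rw [hstep]
    rw [innerA_mem a i (m + 1) (by omega) (by omega)]
    rw [PySem.Set.mem_add]
    constructor
    · rintro ((h | h) | ⟨j, h1, h2, h3⟩)
      · exact Or.inl h
      · exact Or.inr ⟨m, le_refl m, hlt, h⟩
      · exact Or.inr ⟨j, by omega, h2, h3⟩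
    · rintro (h | ⟨j, h1, h2, h3⟩)
      · exact Or.inl (Or.inl h)
      · by_cases hj : j = m
        · subst hj; exact Or.inl (Or.inr h3)
        · exact Or.inr ⟨j, by omega, h2, h3⟩
termination_by a.length - m

-- the prefix table built by port B
theorem pList_eq (a : List Int) :
    a.foldl (fun p x => p ++ [PySem.Int.bxor (PySem.List.pyGetD p (-1) 0) x]) [(0 : Int)]
      = (List.range (a.length + 1)).map (pfx a) := by
  induction a using List.reverseRecOn with
  | nil => simp [pfx]
  | append_singleton a x ih =>
    rw [List.foldl_append, List.foldl_cons, List.foldl_nil, ih]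
    have hlen : ((List.range (a.length + 1)).map (pfx a)).length = a.length + 1 := by simp
    have hlast : PySem.List.pyGetD ((List.range (a.length + 1)).map (pfx a)) (-1) 0 = pfx a a.length := by
      rw [PySem.List.pyGetD_neg_ofNat _ 1 0 (by omega) (by simp)]
      simp
    rw [hlast]
    have hpfx : ∀ k, k ≤ a.length → pfx (a ++ [x]) k = pfx a k := by
      intro k hk
      unfold pfx
      rw [List.take_append_of_le_length hk]
    have hpfx2 : pfx (a ++ [x]) (a.length + 1) = PySem.Int.bxor (pfx a a.length) x := by
      rw [pfx_succ (a ++ [x]) a.length (by simp)]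
      rw [hpfx a.length (le_refl _)]
      simp
    have h2 : (a ++ [x]).length + 1 = (a.length + 1) + 1 := by simp
    rw [h2]
    conv_rhs => rw [List.range_succ, List.map_append]
    congr 1
    · apply List.map_congr_left
      intro k hk
      rw [List.mem_range] at hk
      exact (hpfx k (by omega)).symm
    · simp [hpfx2]


-- the two sets the ports build, and their common membership characterisation
def pvSetA (a : List Int) : PySem.Set Int :=
  (PySem.List.pyRange 0 (PySem.List.len a) 1).foldl (fun xorValues i =>
    ((PySem.List.pyRange i (PySem.List.len a) 1).foldl
      (fun (st : Int × PySem.Set Int) j =>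
        (PySem.Int.bxor st.1 (PySem.List.pyGetD a j 0),
         PySem.Set.add st.2 (PySem.Int.bxor st.1 (PySem.List.pyGetD a j 0))))
      ((0 : Int), xorValues)).2)
    PySem.Set.empty

def pvP (a : List Int) : List Int :=
  a.foldl (fun p x => p ++ [PySem.Int.bxor (PySem.List.pyGetD p (-1) 0) x]) [(0 : Int)]

def pvSetB (a : List Int) : PySem.Set Int :=
  (PySem.List.pyRange 0 (PySem.List.len a) 1).foldl (fun xors i =>
    (PySem.List.pyRange (i + 1) (PySem.List.len a + 1) 1).foldl
      (fun xors j => PySem.Set.add xors (PySem.Int.bxor (PySem.List.pyGetD (pvP a) i 0) (PySem.List.pyGetD (pvP a) j 0)))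
      xors)
    PySem.Set.empty

theorem portA_len (a : List Int) : bit012_solution a = PySem.Set.len (pvSetA a) := rfl

theorem portB_len (a : List Int) : bit012_solution_alt a = PySem.Set.len (pvSetB a) := rfl

def pvMem (a : List Int) (y : Int) : Prop :=
  ∃ i j : Nat, i < j ∧ j ≤ a.length ∧ y = PySem.Int.bxor (pfx a i) (pfx a j)

theorem memA (a : List Int) (y : Int) : y ∈ pvSetA a ↔ pvMem a y := by
  unfold pvSetA
  rw [mem_foldl_of_mem (Q := fun (i : Int) (y : Int) =>
      ∃ j : Nat, i.toNat ≤ j ∧ j < a.length ∧ y = PySem.Int.bxor (pfx a i.toNat) (pfx a (j + 1)))]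
  · show (y ∈ ([] : List Int) ∨ _) ↔ _
    simp only [List.not_mem_nil, false_or]
    constructor
    · rintro ⟨i, hi, j, h1, h2, h3⟩
      exact ⟨i.toNat, j + 1, by omega, by omega, h3⟩
    · rintro ⟨i, j, hij, hj, hy⟩
      refine ⟨(i : Int), ?_, j - 1, by omega, by omega, ?_⟩
      · rw [PySem.List.mem_pyRange_one]
        simp only [PySem.List.len_eq]
        omega
      · simp only [Int.toNat_natCast]
        rw [show j - 1 + 1 = j by omega]
        exact hy
  · intro s i y hi
    rw [PySem.List.mem_pyRange_one] at hi
    have hi' : i.toNat ≤ a.length := by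
      have := hi.2; simp only [PySem.List.len_eq] at this; omega
    rw [show (fun (st : Int × PySem.Set Int) j =>
        (PySem.Int.bxor st.1 (PySem.List.pyGetD a j 0),
         PySem.Set.add st.2 (PySem.Int.bxor st.1 (PySem.List.pyGetD a j 0))))
      = fun st j => pvStepA st (PySem.List.pyGetD a j 0) from rfl]
    rw [PySem.List.foldl_pyRange_pyGetD a 0 pvStepA _ hi.1]
    rw [show ((0 : Int), s) = (PySem.Int.bxor (pfx a i.toNat) (pfx a i.toNat), s) by
      rw [PySem.Int.bxor_self]]
    exact innerA_mem a i.toNat i.toNat (le_refl _) hi' s y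

theorem pGet (a : List Int) (i : Int) (h0 : 0 ≤ i) (h1 : i ≤ (a.length : Int)) :
    PySem.List.pyGetD (pvP a) i 0 = pfx a i.toNat := by
  unfold pvP
  rw [pList_eq]
  rw [show i = ((i.toNat : Nat) : Int) by omega]
  rw [PySem.List.pyGetD_natCast]
  have hb : i.toNat < ((List.range (a.length + 1)).map (pfx a)).length := by simp; omega
  rw [List.getD_eq_getElem _ _ hb]
  simp
  rw [max_eq_left h0]

theorem memB (a : List Int) (y : Int) : y ∈ pvSetB a ↔ pvMem a y := by
  unfold pvSetB
  rw [mem_foldl_of_mem (Q := fun (i : Int) (y : Int) =>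
      ∃ j : Nat, i.toNat < j ∧ j ≤ a.length ∧ y = PySem.Int.bxor (pfx a i.toNat) (pfx a j))]
  · show (y ∈ ([] : List Int) ∨ _) ↔ _
    simp only [List.not_mem_nil, false_or]
    constructor
    · rintro ⟨i, hi, j, h1, h2, h3⟩
      exact ⟨i.toNat, j, h1, h2, h3⟩
    · rintro ⟨i, j, hij, hj, hy⟩
      refine ⟨(i : Int), ?_, j, by omega, hj, ?_⟩
      · rw [PySem.List.mem_pyRange_one]
        simp only [PySem.List.len_eq]
        omega
      · simpa using hy
  · intro s i y hi
    rw [PySem.List.mem_pyRange_one] at hi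
    simp only [PySem.List.len_eq] at hi
    rw [PySem.Set.mem_foldl_add]
    constructor
    · rintro (h | ⟨j, hj, rfl⟩)
      · exact Or.inl h
      · rw [PySem.List.mem_pyRange_one] at hj
        simp only [PySem.List.len_eq] at hj
        refine Or.inr ⟨j.toNat, by omega, by omega, ?_⟩
        rw [pGet a i hi.1 (by omega), pGet a j (by omega) (by omega)]
    · rintro (h | ⟨j, h1, h2, h3⟩)
      · exact Or.inl h
      · refine Or.inr ⟨(j : Int), ?_, ?_⟩
        · rw [PySem.List.mem_pyRange_one]
          simp only [PySem.List.len_eq]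
          omega
        · rw [pGet a i hi.1 (by omega), pGet a (j : Int) (by omega) (by omega)]
          simpa using h3

theorem nodupA (a : List Int) : (pvSetA a).Nodup := by
  unfold pvSetA
  refine nodup_foldl ?_ _ _ List.nodup_nil
  intro s i hs
  rw [show (fun (st : Int × PySem.Set Int) j =>
      (PySem.Int.bxor st.1 (PySem.List.pyGetD a j 0),
       PySem.Set.add st.2 (PySem.Int.bxor st.1 (PySem.List.pyGetD a j 0))))
    = fun st j => pvStepA st (PySem.List.pyGetD a j 0) from rfl]
  rw [← List.foldl_map]
  exact innerA_nodup _ _ _ hs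

theorem nodupB (a : List Int) : (pvSetB a).Nodup := by
  unfold pvSetB
  refine nodup_foldl ?_ _ _ List.nodup_nil
  intro s i hs
  exact nodup_foldl (fun s j h => PySem.Set.nodup_add s _ h) _ _ hs

theorem sets_len_eq (a : List Int) : (pvSetA a).length = (pvSetB a).length :=
  List.Perm.length_eq
    ((List.perm_ext_iff_of_nodup (nodupA a) (nodupB a)).mpr
      (fun y => (memA a y).trans (memB a y).symm))

-- ===== VERDICT (by name: the statement is the Claim_ definition above) =====
theorem bit012_solution_spec : Claim_equal_bit012_solution := by
  intro a _
  unfold Spec_bit012_solution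
  rw [portA_len, portB_len]
  unfold PySem.Set.len
  exact congrArg _ (sets_len_eq a)
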